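-- pv_equiv track=rewrite | github.com/calderov/coding_interview_problems | Practice/44_Practice.py | isUnknownIsland
-- ===== SOURCE A (Python) =====
-- def isUnknownIsland(grid, startRow, startCol, visited):
--     rows = len(grid)
--     cols = len(grid[0])
--
--     pending = [(startRow, startCol)]
--     landFound = False
--
--     while pending:
--         row, col = pending.pop()
--
--         if grid[row][col] == "0": # Explore current cell
--             continue
--
--         if (row, col) in visited:
--             continue
--
--         visited.add((row, col))
--         landFound = True
--
--         if row > 0:        pending.append((row - 1, col)) # up
--         if row < rows - 1: pending.append((row + 1, col)) # down
--         if col > 0:        pending.append((row, col - 1)) # left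
--         if col < cols - 1: pending.append((row, col + 1)) # right
--
--     return landFound
-- ===== SOURCE B (Python) =====
-- def isUnknownIsland(grid, startRow, startCol, visited):
--     # Answer is decided by the start cell alone; the flood fill afterwards only
--     # updates `visited` (same in-place mutation as the original).
--     if grid[startRow][startCol] == "0" or (startRow, startCol) in visited:
--         return False
--
--     rows = len(grid)
--     cols = len(grid[0])
--
--     visited.add((startRow, startCol))
--     frontier = [(startRow, startCol)]
--     while frontier:
--         nxt = []
--         for row, col in frontier:
--             neighbors = []
--             if row > 0:        neighbors.append((row - 1, col)) # up
--             if row < rows - 1: neighbors.append((row + 1, col)) # down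
--             if col > 0:        neighbors.append((row, col - 1)) # left
--             if col < cols - 1: neighbors.append((row, col + 1)) # right
--             for cell in neighbors:
--                 if cell not in visited and grid[cell[0]][cell[1]] != "0":
--                     visited.add(cell)
--                     nxt.append(cell)
--         frontier = nxt
--     return True
-- ===== Notes on version B (the rewrite author's own statement) =====
-- stated objective: alternative
-- what changed: B decides the result up front from the start cell alone (the original's landFound can only be set on the very first pop) and then runs the flood fill as a breadth-first frontier sweep that tests land/visited before enqueueing, instead of A's LIFO pending stack with a landFound flag and pop-time re-checks.
-- outside the precondition, e.g. on isUnknownIsland([['1', '0'], ['0']], 0, 0, set()): A returns True, B returns True; on isUnknownIsland([[], ['0'], ['1']], 2, 0, set()): A returns True, B returns True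
import Mathlib
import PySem

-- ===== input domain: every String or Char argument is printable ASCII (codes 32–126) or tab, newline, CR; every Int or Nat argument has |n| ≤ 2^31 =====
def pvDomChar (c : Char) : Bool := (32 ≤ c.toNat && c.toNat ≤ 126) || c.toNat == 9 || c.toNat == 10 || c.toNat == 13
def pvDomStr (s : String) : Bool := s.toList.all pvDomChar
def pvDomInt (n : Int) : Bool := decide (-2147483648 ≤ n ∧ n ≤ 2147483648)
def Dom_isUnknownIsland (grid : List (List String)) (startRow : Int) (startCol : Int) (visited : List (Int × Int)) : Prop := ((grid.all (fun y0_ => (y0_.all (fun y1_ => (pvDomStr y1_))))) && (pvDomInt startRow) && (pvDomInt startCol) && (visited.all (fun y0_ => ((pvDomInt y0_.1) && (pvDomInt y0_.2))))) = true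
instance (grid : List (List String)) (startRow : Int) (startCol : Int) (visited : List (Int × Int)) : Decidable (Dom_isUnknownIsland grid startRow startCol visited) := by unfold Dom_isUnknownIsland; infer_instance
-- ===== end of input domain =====

-- B replaces A's LIFO pending stack + landFound flag by an up-front answer from the start cell plus a
-- breadth-first frontier sweep that checks cells before enqueueing (objective: alternative).  Both
-- Pythons mutate `visited` in place in the same way; the ports and the equivalence are about the
-- Bool return value only.

-- ===== PORT A =====
-- fuel: a generous upper bound on the number of loop iterations (total pops ≤ 1 + 4·|cells ever
-- visited|, and all visited cells lie in [-rows,rows) × [-cols,cols)); never exhausted on a run the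
-- Python finishes, and only used to make the recursion structural.
def pvA_fuel (grid : List (List String)) : Nat :=
  16 * grid.length * (grid.headD []).length + 8

-- the `while pending:` loop; `pending` is kept top-first (Python pops and appends at the END),
-- so Python's append is a cons here and the head is the next cell popped.
def pvA_loop (grid : List (List String)) (rows cols : Int) :
    Nat → List (Int × Int) → PySem.Set (Int × Int) → Bool → Bool
  | 0, _, _, landFound => landFound
  | _ + 1, [], _, landFound => landFound
  | fuel + 1, (row, col) :: rest, visited, landFound =>
    match PySem.List.pyGet? grid row with
    | none => landFound      -- grid[row] raises IndexError; outside Pre_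
    | some gridRow =>
      match PySem.List.pyGet? gridRow col with
      | none => landFound    -- grid[row][col] raises IndexError; outside Pre_
      | some cell =>
        if cell == "0" then pvA_loop grid rows cols fuel rest visited landFound
        else if PySem.Set.contains visited (row, col) then
          pvA_loop grid rows cols fuel rest visited landFound
        else
          let visited := PySem.Set.add visited (row, col)
          let pending := rest
          let pending := if row > 0 then (row - 1, col) :: pending else pending        -- up
          let pending := if row < rows - 1 then (row + 1, col) :: pending else pending -- down
          let pending := if col > 0 then (row, col - 1) :: pending else pending       -- left
          let pending := if col < cols - 1 then (row, col + 1) :: pending else pending -- right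
          pvA_loop grid rows cols fuel pending visited true

def isUnknownIsland (grid : List (List String)) (startRow : Int) (startCol : Int) (visited : List (Int × Int)) : Bool :=
  let rows : Int := grid.length
  match PySem.List.pyGet? grid 0 with
  | none => false            -- len(grid[0]) raises IndexError on an empty grid; outside Pre_
  | some row0 =>
    let cols : Int := row0.length
    pvA_loop grid rows cols (pvA_fuel grid) [(startRow, startCol)] (PySem.Set.ofList visited) false

-- ===== PORT B =====
def pvB_neighbors (rows cols row col : Int) : List (Int × Int) :=
  ((((if row > 0 then [(row - 1, col)] else []) ++
     (if row < rows - 1 then [(row + 1, col)] else [])) ++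
     (if col > 0 then [(row, col - 1)] else [])) ++
     (if col < cols - 1 then [(row, col + 1)] else []))

-- `if cell not in visited and grid[cell[0]][cell[1]] != "0": visited.add(cell); nxt.append(cell)`
def pvB_visit (grid : List (List String)) (st : PySem.Set (Int × Int) × List (Int × Int))
    (cell : Int × Int) : PySem.Set (Int × Int) × List (Int × Int) :=
  if PySem.Set.contains st.1 cell then st
  else
    match PySem.List.pyGet? grid cell.1 with
    | none => st             -- grid[cell[0]] raises IndexError; outside Pre_
    | some gridRow =>
      match PySem.List.pyGet? gridRow cell.2 with
      | none => st           -- grid[cell[0]][cell[1]] raises IndexError; outside Pre_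
      | some v => if v == "0" then st else (PySem.Set.add st.1 cell, st.2 ++ [cell])

-- one pass of the `for row, col in frontier:` body, threading (visited, nxt)
def pvB_layer (grid : List (List String)) (rows cols : Int) (frontier : List (Int × Int))
    (visited : PySem.Set (Int × Int)) : PySem.Set (Int × Int) × List (Int × Int) :=
  frontier.foldl (fun st rc => (pvB_neighbors rows cols rc.1 rc.2).foldl (pvB_visit grid) st)
    (visited, [])

-- fuel: the number of frontier layers is at most the number of cells ever visited plus one;
-- never exhausted on a run the Python finishes.
def pvB_fuel (grid : List (List String)) : Nat :=
  4 * grid.length * (grid.headD []).length + 2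

def pvB_bfs (grid : List (List String)) (rows cols : Int) :
    Nat → List (Int × Int) → PySem.Set (Int × Int) → PySem.Set (Int × Int)
  | 0, _, visited => visited
  | _ + 1, [], visited => visited
  | fuel + 1, f :: fs, visited =>
    let st := pvB_layer grid rows cols (f :: fs) visited
    pvB_bfs grid rows cols fuel st.2 st.1

def isUnknownIsland_alt (grid : List (List String)) (startRow : Int) (startCol : Int) (visited : List (Int × Int)) : Bool :=
  match PySem.List.pyGet? grid startRow with
  | none => false            -- grid[startRow] raises IndexError; outside Pre_
  | some gridRow =>
    match PySem.List.pyGet? gridRow startCol with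
    | none => false          -- grid[startRow][startCol] raises IndexError; outside Pre_
    | some cell =>
      let visitedSet : PySem.Set (Int × Int) := PySem.Set.ofList visited
      if cell == "0" || PySem.Set.contains visitedSet (startRow, startCol) then false
      else
        let rows : Int := grid.length
        let cols : Int := (grid.headD []).length
        let visitedSet := PySem.Set.add visitedSet (startRow, startCol)
        -- the flood fill only updates `visited` (a side effect invisible to the Bool result)
        let _fill := pvB_bfs grid rows cols (pvB_fuel grid) [(startRow, startCol)] visitedSet
        true

-- ===== PRECONDITION & SPEC =====
-- Pre_ excludes inputs where A raises IndexError: an empty grid, a start index outside Python's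
-- (negative-wrapping) range, and ragged grids with a row shorter than row 0 — on a ragged grid
-- whether A's exploration actually reaches a too-short row (and raises) depends on the flood fill,
-- not on a closed-form shape, so all such grids are excluded even though A returns on some of them.
def Pre_isUnknownIsland (grid : List (List String)) (startRow : Int) (startCol : Int) (visited : List (Int × Int)) : Prop :=
  grid ≠ [] ∧
  -(grid.length : Int) ≤ startRow ∧ startRow < (grid.length : Int) ∧
  -((grid.headD []).length : Int) ≤ startCol ∧ startCol < ((grid.headD []).length : Int) ∧
  ∀ r ∈ grid, (grid.headD []).length ≤ r.length
instance (grid : List (List String)) (startRow : Int) (startCol : Int) (visited : List (Int × Int)) : Decidable (Pre_isUnknownIsland grid startRow startCol visited) := by unfold Pre_isUnknownIsland; infer_instance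

def pvWitness_isUnknownIsland : List (List String) × Int × Int × (List (Int × Int)) :=
  ([["1", "0"], ["0", "1"]], 0, 0, [(1, 1)])

def Spec_isUnknownIsland (grid : List (List String)) (startRow : Int) (startCol : Int) (visited : List (Int × Int)) (out : Bool) : Prop := out = isUnknownIsland_alt grid startRow startCol visited
instance (grid : List (List String)) (startRow : Int) (startCol : Int) (visited : List (Int × Int)) (out : Bool) : Decidable (Spec_isUnknownIsland grid startRow startCol visited out) := by unfold Spec_isUnknownIsland; infer_instance

-- ===== CLAIM (what is proved, stated in full; the proofs are below) =====
def Claim_equal_isUnknownIsland : Prop := ∀ (grid : List (List String)) (startRow : Int) (startCol : Int) (visited : List (Int × Int)), Dom_isUnknownIsland grid startRow startCol visited → Pre_isUnknownIsland grid startRow startCol visited → Spec_isUnknownIsland grid startRow startCol visited (isUnknownIsland grid startRow startCol visited)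

-- ===== LEMMAS AND PROOFS =====

-- A's loop returns landFound as soon as pending is empty
theorem pvA_loop_nil (grid : List (List String)) (rows cols : Int) (fuel : Nat)
    (visited : PySem.Set (Int × Int)) (landFound : Bool) :
    pvA_loop grid rows cols fuel [] visited landFound = landFound := by
  cases fuel <;> rfl

-- once landFound is true it stays true: every branch of the loop keeps it
theorem pvA_loop_true (grid : List (List String)) (rows cols : Int) (fuel : Nat)
    (pending : List (Int × Int)) (visited : PySem.Set (Int × Int)) :
    pvA_loop grid rows cols fuel pending visited true = true := by
  induction fuel generalizing pending visited with
  | zero => rfl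
  | succ fuel ih =>
    cases pending with
    | nil => rfl
    | cons hd tl =>
      obtain ⟨row, col⟩ := hd
      simp only [pvA_loop]
      split
      · rfl
      · split
        · rfl
        · split_ifs <;> simp [ih]

-- ===== VERDICT (by name: the statement is the Claim_ definition above) =====
theorem isUnknownIsland_spec : Claim_equal_isUnknownIsland := by
  intro grid startRow startCol visited _hdom hpre
  obtain ⟨hne, hr1, hr2, hc1, hc2, hlen⟩ := hpre
  obtain ⟨g0, gs, rfl⟩ := List.exists_cons_of_ne_nil hne
  simp only [List.headD_cons] at hc1 hc2 hlen
  -- grid[startRow] succeeds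
  obtain ⟨gridRow, hrow⟩ : ∃ gr, PySem.List.pyGet? (g0 :: gs) startRow = some gr := by
    cases h : PySem.List.pyGet? (g0 :: gs) startRow with
    | none =>
      have hin : PySem.Raise.InRange (g0 :: gs).length startRow := by
        unfold PySem.Raise.InRange; exact ⟨hr1, hr2⟩
      exact absurd hin ((PySem.List.pyGet?_eq_none_iff _ _).mp h)
    | some gr => exact ⟨gr, rfl⟩
  -- grid[startRow][startCol] succeeds (the row is at least as long as row 0)
  have hglen : (g0.length : Int) ≤ gridRow.length := by
    exact_mod_cast hlen gridRow (PySem.List.mem_of_pyGet?_eq_some _ hrow)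
  obtain ⟨cell, hcell⟩ : ∃ c, PySem.List.pyGet? gridRow startCol = some c := by
    cases h : PySem.List.pyGet? gridRow startCol with
    | none =>
      have hin : PySem.Raise.InRange gridRow.length startCol := by
        unfold PySem.Raise.InRange; constructor <;> omega
      exact absurd hin ((PySem.List.pyGet?_eq_none_iff _ _).mp h)
    | some c => exact ⟨c, rfl⟩
  -- unfold both ports down to the decision on the start cell
  unfold Spec_isUnknownIsland isUnknownIsland isUnknownIsland_alt
  have hf : pvA_fuel (g0 :: gs) = (pvA_fuel (g0 :: gs) - 1) + 1 := by
    unfold pvA_fuel; omega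
  rw [hf]
  simp only [PySem.List.pyGet?_zero_cons, hrow, hcell, pvA_loop]
  cases hc : cell == "0" with
  | true => simp [pvA_loop_nil]
  | false =>
    cases hm : PySem.Set.contains (PySem.Set.ofList visited) (startRow, startCol) with
    | true => simp [pvA_loop_nil]
    | false => simp [pvA_loop_true]
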